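-- pv_equiv track=rewrite | github.com/NightSkumbry/shvetsov | kompege/19/12108.py | f19
-- ===== SOURCE A (Python) =====
-- def f19(x, y, t=0):
--     if x + y >= 275:
--         if t in [2]:
--             return True
--         return False
--     if t >= 2:
--         return False
--
--     a = [f19(x+7, y, t+1), f19(x+3, y, t+1), f19(x*4, y, t+1), f19(x, y+7, t+1), f19(x, y+3, t+1), f19(x, y*4, t+1)]
--
--     if t%2 == 0:
--         return all(a)
--     return any(a)
-- ===== SOURCE B (Python) =====
-- def _moves(x, y):
--     return [(x + 7, y), (x + 3, y), (x * 4, y), (x, y + 7), (x, y + 3), (x, y * 4)]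
--
--
-- def f19(x, y, t=0):
--     if x + y >= 275:
--         return t == 2
--     if t >= 2:
--         return False
--     stack = [(t, _moves(x, y), [])]
--     ret = None
--     while stack:
--         ft, pending, results = stack.pop()
--         if ret is not None:
--             results = results + [ret]
--             ret = None
--         if not pending:
--             ret = all(results) if ft % 2 == 0 else any(results)
--             continue
--         (nx, ny), pending = pending[0], pending[1:]
--         stack.append((ft, pending, results))
--         ct = ft + 1
--         if nx + ny >= 275:
--             ret = (ct == 2)
--         elif ct >= 2:
--             ret = False
--         else:
--             stack.append((ct, _moves(nx, ny), []))
--     return ret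
-- ===== Notes on version B (the rewrite author's own statement) =====
-- stated objective: alternative
-- what changed: A's six-way mutual recursion over the AND/OR game tree is replaced by an iterative explicit-stack post-order DFS whose frames carry the level, the pending successor states and the accumulated child results, folded with all/any when a frame completes.
import Mathlib
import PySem

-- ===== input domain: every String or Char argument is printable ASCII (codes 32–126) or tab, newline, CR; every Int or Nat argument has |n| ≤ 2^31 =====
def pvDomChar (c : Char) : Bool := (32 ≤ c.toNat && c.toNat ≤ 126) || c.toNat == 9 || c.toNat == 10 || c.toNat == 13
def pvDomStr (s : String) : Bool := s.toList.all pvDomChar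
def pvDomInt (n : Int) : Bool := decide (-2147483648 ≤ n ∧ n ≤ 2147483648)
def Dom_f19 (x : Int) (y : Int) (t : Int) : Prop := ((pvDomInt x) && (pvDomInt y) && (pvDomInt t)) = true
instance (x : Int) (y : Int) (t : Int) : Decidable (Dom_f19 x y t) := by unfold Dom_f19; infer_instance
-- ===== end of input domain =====

-- B replaces A's six-way recursion over the AND/OR game tree by an explicit-stack
-- post-order DFS (objective: alternative decomposition, same cost; equal return value proved).
-- Recursive definitions carry a fuel argument (a totality guard only: fuel is always sufficient,
-- proved by the fuel-irrelevance lemmas below; the 0-fuel branches are never reached).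

-- ===== PORT A =====
def f19go (fuel : Nat) (x : Int) (y : Int) (t : Int) : Bool :=
  match fuel with
  | 0 => false  -- unreachable: f19 supplies fuel > (2 - t).toNat, the recursion depth
  | fuel + 1 =>
    if x + y ≥ 275 then
      if t = 2 then true else false
    else if t ≥ 2 then false
    else
      let a := [f19go fuel (x+7) y (t+1), f19go fuel (x+3) y (t+1), f19go fuel (x*4) y (t+1),
                f19go fuel x (y+7) (t+1), f19go fuel x (y+3) (t+1), f19go fuel x (y*4) (t+1)]
      if t % 2 = 0 then a.all id else a.any id

def f19 (x : Int) (y : Int) (t : Int) : Bool :=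
  f19go ((2 - t).toNat + 1) x y t

-- ===== PORT B =====
def pyMoves (x : Int) (y : Int) : List (Int × Int) :=
  [(x+7, y), (x+3, y), (x*4, y), (x, y+7), (x, y+3), (x, y*4)]

-- node count of the game subtree rooted at (x, y) at level t: fuel bound for the stack loop
def pvCostGo (fuel : Nat) (x : Int) (y : Int) (t : Int) : Nat :=
  match fuel with
  | 0 => 1  -- unreachable: pvCost supplies fuel > (2 - t).toNat
  | fuel + 1 =>
    if x + y ≥ 275 ∨ t ≥ 2 then 1
    else 2 + pvCostGo fuel (x+7) y (t+1) + pvCostGo fuel (x+3) y (t+1) + pvCostGo fuel (x*4) y (t+1)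
           + pvCostGo fuel x (y+7) (t+1) + pvCostGo fuel x (y+3) (t+1) + pvCostGo fuel x (y*4) (t+1)

def pvCost (x : Int) (y : Int) (t : Int) : Nat :=
  pvCostGo ((2 - t).toNat + 1) x y t

def pvFrameCost : Int × List (Int × Int) × List Bool → Nat
  | (ft, pending, _) => 1 + (pending.map (fun p => pvCost p.1 p.2 (ft+1))).sum

def pvStackCost (s : List (Int × List (Int × Int) × List Bool)) : Nat :=
  (s.map pvFrameCost).sum

-- the while-loop of Source B: ret carries the value produced by the previous iteration (None = none);
-- "if ret is not None: results = results + [ret]" is ported as appending ret.toList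
def f19run (fuel : Nat) (ret : Option Bool) (stack : List (Int × List (Int × Int) × List Bool)) : Bool :=
  match fuel, stack with
  | _, [] => ret.getD false  -- loop exit: Source B returns ret (always set when reached from f19_alt)
  | 0, _ :: _ => false  -- unreachable: f19_alt supplies fuel = pvStackCost stack, the exact step count
  | fuel + 1, (ft, pending, results) :: rest =>
    match pending with
    | [] =>
      f19run fuel (some (if ft % 2 = 0 then (results ++ ret.toList).all id
                         else (results ++ ret.toList).any id)) rest
    | (nx, ny) :: pend =>
      if nx + ny ≥ 275 then
        f19run fuel (some (decide (ft + 1 = 2))) ((ft, pend, results ++ ret.toList) :: rest)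
      else if ft + 1 ≥ 2 then
        f19run fuel (some false) ((ft, pend, results ++ ret.toList) :: rest)
      else
        f19run fuel none ((ft + 1, pyMoves nx ny, []) :: (ft, pend, results ++ ret.toList) :: rest)

def f19_alt (x : Int) (y : Int) (t : Int) : Bool :=
  if x + y ≥ 275 then decide (t = 2)
  else if t ≥ 2 then false
  else
    let stack := [(t, pyMoves x y, ([] : List Bool))]
    f19run (pvStackCost stack) none stack

-- ===== PRECONDITION & SPEC =====
-- Pre_ excludes non-leaf inputs (x + y < 275) with very negative t, where CPython evaluates
-- A's recursion to depth 2 - t and raises RecursionError (interpreter stack limit) instead of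
-- returning; on the excluded range A raises or (for the least negative t of it) never finishes.
def Pre_f19 (x : Int) (y : Int) (t : Int) : Prop := x + y ≥ 275 ∨ -900 ≤ t
instance (x : Int) (y : Int) (t : Int) : Decidable (Pre_f19 x y t) := by unfold Pre_f19; infer_instance
def pvWitness_f19 : Int × Int × Int := (0, 0, 0)

def Spec_f19 (x : Int) (y : Int) (t : Int) (out : Bool) : Prop := out = f19_alt x y t
instance (x : Int) (y : Int) (t : Int) (out : Bool) : Decidable (Spec_f19 x y t out) := by unfold Spec_f19; infer_instance

-- ===== CLAIM (what is proved, stated in full; the proofs are below) =====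
def Claim_equal_f19 : Prop := ∀ (x : Int) (y : Int) (t : Int), Dom_f19 x y t → Pre_f19 x y t → Spec_f19 x y t (f19 x y t)

-- ===== LEMMAS AND PROOFS =====

def pvCombine (ft : Int) (l : List Bool) : Bool := if ft % 2 = 0 then l.all id else l.any id

-- denotation of a machine configuration in terms of A's recursive evaluator
def pvDenote (ret : Option Bool) : List (Int × List (Int × Int) × List Bool) → Bool
  | [] => ret.getD false
  | (ft, pending, results) :: rest =>
      pvDenote (some (pvCombine ft ((results ++ ret.toList)
        ++ pending.map (fun p => f19 p.1 p.2 (ft+1))))) rest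

theorem f19go_fuel (f1 : Nat) : ∀ (f2 : Nat) (x y t : Int), (2 - t).toNat < f1 → (2 - t).toNat < f2 →
    f19go f1 x y t = f19go f2 x y t := by
  induction f1 with
  | zero => intro f2 x y t h1 _; omega
  | succ f ih =>
    intro f2 x y t h1 h2
    match f2, h2 with
    | g + 1, _ =>
      by_cases ha : x + y ≥ 275
      · simp [f19go, ha]
      · by_cases hb : t ≥ 2
        · simp [f19go, ha, hb]
        · have hf : (2 - (t + 1)).toNat < f := by omega
          have hg : (2 - (t + 1)).toNat < g := by omega
          simp only [f19go, if_neg ha, if_neg hb,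
            ih g (x+7) y (t+1) hf hg, ih g (x+3) y (t+1) hf hg, ih g (x*4) y (t+1) hf hg,
            ih g x (y+7) (t+1) hf hg, ih g x (y+3) (t+1) hf hg, ih g x (y*4) (t+1) hf hg]

theorem f19_leaf_hi (x y t : Int) (h : x + y ≥ 275) : f19 x y t = decide (t = 2) := by
  simp only [f19, f19go, if_pos h]
  by_cases ht : t = 2 <;> simp [ht]

theorem f19_leaf_t (x y t : Int) (h : ¬ x + y ≥ 275) (h2 : t ≥ 2) : f19 x y t = false := by
  simp [f19, f19go, h, h2]

theorem f19_node (x y t : Int) (h : ¬ x + y ≥ 275) (h2 : ¬ t ≥ 2) :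
    f19 x y t = pvCombine t ((pyMoves x y).map (fun p => f19 p.1 p.2 (t+1))) := by
  have hfuel : ∀ (a b : Int), f19go ((2 - t).toNat) a b (t+1) = f19go ((2 - (t+1)).toNat + 1) a b (t+1) :=
    fun a b => f19go_fuel _ _ a b (t+1) (by omega) (by omega)
  simp only [f19, f19go, if_neg h, if_neg h2, pvCombine, pyMoves, List.map_cons, List.map_nil,
    hfuel]

theorem pvCostGo_fuel (f1 : Nat) : ∀ (f2 : Nat) (x y t : Int), (2 - t).toNat < f1 → (2 - t).toNat < f2 →
    pvCostGo f1 x y t = pvCostGo f2 x y t := by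
  induction f1 with
  | zero => intro f2 x y t h1 _; omega
  | succ f ih =>
    intro f2 x y t h1 h2
    match f2, h2 with
    | g + 1, _ =>
      by_cases ha : x + y ≥ 275 ∨ t ≥ 2
      · simp [pvCostGo, ha]
      · have hf : (2 - (t + 1)).toNat < f := by omega
        have hg : (2 - (t + 1)).toNat < g := by omega
        simp only [pvCostGo, if_neg ha,
          ih g (x+7) y (t+1) hf hg, ih g (x+3) y (t+1) hf hg, ih g (x*4) y (t+1) hf hg,
          ih g x (y+7) (t+1) hf hg, ih g x (y+3) (t+1) hf hg, ih g x (y*4) (t+1) hf hg]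

theorem pvCost_leaf (x y t : Int) (h : x + y ≥ 275 ∨ t ≥ 2) : pvCost x y t = 1 := by
  simp [pvCost, pvCostGo, h]

theorem pvCost_node (x y t : Int) (h : ¬ (x + y ≥ 275 ∨ t ≥ 2)) :
    pvCost x y t = 2 + pvCost (x+7) y (t+1) + pvCost (x+3) y (t+1) + pvCost (x*4) y (t+1)
                     + pvCost x (y+7) (t+1) + pvCost x (y+3) (t+1) + pvCost x (y*4) (t+1) := by
  have hfuel : ∀ (a b : Int), pvCostGo ((2 - t).toNat) a b (t+1) = pvCostGo ((2 - (t+1)).toNat + 1) a b (t+1) :=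
    fun a b => pvCostGo_fuel _ _ a b (t+1) (by omega) (by omega)
  simp only [pvCost, pvCostGo, if_neg h, hfuel]

theorem f19run_denote (fuel : Nat) : ∀ (ret : Option Bool) (stack : List (Int × List (Int × Int) × List Bool)),
    pvStackCost stack ≤ fuel → f19run fuel ret stack = pvDenote ret stack := by
  induction fuel with
  | zero =>
    intro ret stack hle
    match stack with
    | [] => simp [f19run, pvDenote]
    | (ft, pending, results) :: rest =>
      exfalso
      simp only [pvStackCost, List.map_cons, List.sum_cons, pvFrameCost] at hle
      omega
  | succ fuel ih =>
    intro ret stack hle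
    match stack with
    | [] => simp [f19run, pvDenote]
    | (ft, pending, results) :: rest =>
      simp only [pvStackCost, List.map_cons, List.sum_cons, pvFrameCost] at hle
      match pending with
      | [] =>
        rw [show f19run (fuel+1) ret ((ft, [], results) :: rest)
              = f19run fuel (some (if ft % 2 = 0 then (results ++ ret.toList).all id
                                   else (results ++ ret.toList).any id)) rest from rfl]
        rw [ih _ rest (by simpa [pvStackCost] using by omega)]
        simp [pvDenote, pvCombine]
      | (nx, ny) :: pend =>
        by_cases ha : nx + ny ≥ 275
        · have hc := pvCost_leaf nx ny (ft+1) (Or.inl ha)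
          simp only [List.map_cons, List.sum_cons] at hle
          rw [show f19run (fuel+1) ret ((ft, (nx, ny) :: pend, results) :: rest)
                = f19run fuel (some (decide (ft + 1 = 2))) ((ft, pend, results ++ ret.toList) :: rest) from by
              simp [f19run, ha]]
          rw [ih _ _ (by simp only [pvStackCost, List.map_cons, List.sum_cons, pvFrameCost]; omega)]
          simp [pvDenote, f19_leaf_hi nx ny (ft+1) ha]
        · by_cases hb : ft + 1 ≥ 2
          · have hc := pvCost_leaf nx ny (ft+1) (Or.inr hb)
            simp only [List.map_cons, List.sum_cons] at hle
            rw [show f19run (fuel+1) ret ((ft, (nx, ny) :: pend, results) :: rest)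
                  = f19run fuel (some false) ((ft, pend, results ++ ret.toList) :: rest) from by
                simp [f19run, ha, hb]]
            rw [ih _ _ (by simp only [pvStackCost, List.map_cons, List.sum_cons, pvFrameCost]; omega)]
            simp [pvDenote, f19_leaf_t nx ny (ft+1) ha hb]
          · have hc := pvCost_node nx ny (ft+1) (by omega)
            simp only [List.map_cons, List.sum_cons] at hle
            rw [show f19run (fuel+1) ret ((ft, (nx, ny) :: pend, results) :: rest)
                  = f19run fuel none ((ft + 1, pyMoves nx ny, []) :: (ft, pend, results ++ ret.toList) :: rest) from by
                simp [f19run, ha, hb]]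
            rw [ih _ _ (by
              simp only [pvStackCost, List.map_cons, List.sum_cons, pvFrameCost, pyMoves,
                List.map_nil, List.sum_nil]
              omega)]
            simp [pvDenote, f19_node nx ny (ft+1) ha hb]

theorem f19_eq_alt (x y t : Int) : f19 x y t = f19_alt x y t := by
  unfold f19_alt
  by_cases h : x + y ≥ 275
  · simp [h, f19_leaf_hi x y t h]
  · by_cases h2 : t ≥ 2
    · simp [h, h2, f19_leaf_t x y t h h2]
    · simp only [h, h2, if_false]
      rw [f19run_denote _ none _ le_rfl, f19_node x y t h h2]
      simp [pvDenote]

-- ===== VERDICT (by name: the statement is the Claim_ definition above) =====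
theorem f19_spec : Claim_equal_f19 := by
  intro x y t
  exact fun _ _ => f19_eq_alt x y t
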